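-- pv_equiv track=rewrite | github.com/janmasarik/bucketsperm | bucketsperm/modules/google.py | validate_bucket_name
-- ===== SOURCE A (Python) =====
-- import string
--
-- def validate_bucket_name(bucket_name):
--     if len(bucket_name) < 3 or len(bucket_name) > 63:
--         return False
--
--     allowed_chars = set(string.digits + string.ascii_letters + "-_.")
--
--     if any(c not in allowed_chars for c in bucket_name):
--         return False
--
--     if any(
--         c not in set(string.ascii_lowercase + string.digits)
--         for c in [bucket_name[0], bucket_name[-1]]
--     ):
--         return False
--
--     return True
-- ===== SOURCE B (Python) =====
-- import re
--
-- _BUCKET_RE = re.compile(r'[a-z0-9][0-9A-Za-z\-_.]{1,61}[a-z0-9]')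
--
-- def validate_bucket_name(bucket_name):
--     return _BUCKET_RE.fullmatch(bucket_name) is not None
-- ===== Notes on version B (the rewrite author's own statement) =====
-- stated objective: idiomatic
-- what changed: Replaced explicit length check and two character-membership loops with a single anchored regex fullmatch encoding end classes, middle class and the 3..63 length window at once.
import Mathlib
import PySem

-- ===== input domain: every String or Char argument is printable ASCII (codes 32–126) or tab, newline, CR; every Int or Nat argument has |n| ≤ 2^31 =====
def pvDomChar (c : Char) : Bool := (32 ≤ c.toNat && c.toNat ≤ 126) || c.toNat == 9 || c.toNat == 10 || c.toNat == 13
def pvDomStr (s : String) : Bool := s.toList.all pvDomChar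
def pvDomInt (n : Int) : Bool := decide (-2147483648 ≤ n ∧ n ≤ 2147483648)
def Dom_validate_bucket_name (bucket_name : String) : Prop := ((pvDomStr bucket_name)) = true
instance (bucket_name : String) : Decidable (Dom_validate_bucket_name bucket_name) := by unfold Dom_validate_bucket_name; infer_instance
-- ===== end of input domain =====

-- B replaces A's explicit length test and two membership loops with one anchored regex fullmatch
-- (idiomatic, same O(n) cost); ported here as the regex's structural meaning.

-- ===== PORT A =====
-- string.digits + string.ascii_letters + "-_." (the set A builds)
def pvAllowedChars : List Char := "0123456789abcdefghijklmnopqrstuvwxyzABCDEFGHIJKLMNOPQRSTUVWXYZ-_.".toList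
-- string.ascii_lowercase + string.digits (A's end-character set)
def pvEndChars : List Char := "abcdefghijklmnopqrstuvwxyz0123456789".toList

def validate_bucket_name (bucket_name : String) : Bool :=
  let l := bucket_name.toList
  if l.length < 3 || l.length > 63 then false
  else if l.any (fun c => !(pvAllowedChars.contains c)) then false
  else if ([l.headD ' ', l.getLastD ' '].any (fun c => !(pvEndChars.contains c))) then false
  else true

-- ===== PORT B =====
-- Transliteration of the regex r'[a-z0-9][0-9A-Za-z\-_.]{1,61}[a-z0-9]' under fullmatch:
-- first char in the end class, then 1..61 middle chars in the middle class, then a last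
-- char in the end class (exact on all strings).
def validate_bucket_name_alt (bucket_name : String) : Bool :=
  match bucket_name.toList with
  | [] => false
  | first :: rest =>
    match rest with
    | [] => false
    | _ :: _ =>
      let mid := rest.dropLast
      let lastC := rest.getLastD ' '
      pvEndChars.contains first
        && (1 ≤ mid.length && mid.length ≤ 61)
        && mid.all pvAllowedChars.contains
        && pvEndChars.contains lastC

-- ===== PRECONDITION & SPEC =====
def Spec_validate_bucket_name (bucket_name : String) (out : Bool) : Prop := out = validate_bucket_name_alt bucket_name
instance (bucket_name : String) (out : Bool) : Decidable (Spec_validate_bucket_name bucket_name out) := by unfold Spec_validate_bucket_name; infer_instance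

-- ===== CLAIM (what is proved, stated in full; the proofs are below) =====
def Claim_equal_validate_bucket_name : Prop := ∀ (bucket_name : String), Dom_validate_bucket_name bucket_name → Spec_validate_bucket_name bucket_name (validate_bucket_name bucket_name)

-- ===== LEMMAS AND PROOFS =====

-- the end class is contained in the middle class
theorem pvEnd_sub_allowed (c : Char) (h : pvEndChars.contains c = true) :
    pvAllowedChars.contains c = true := by
  have hall : pvEndChars.all pvAllowedChars.contains = true := by decide
  exact List.all_eq_true.mp hall c (by simpa using h)

theorem validate_bucket_name_list (l : List Char) :
    (if l.length < 3 || l.length > 63 then false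
     else if l.any (fun c => !(pvAllowedChars.contains c)) then false
     else if ([l.headD ' ', l.getLastD ' '].any (fun c => !(pvEndChars.contains c))) then false
     else true)
    = (match l with
       | [] => false
       | first :: rest =>
         match rest with
         | [] => false
         | _ :: _ =>
           pvEndChars.contains first
             && (1 ≤ rest.dropLast.length && rest.dropLast.length ≤ 61)
             && rest.dropLast.all pvAllowedChars.contains
             && pvEndChars.contains (rest.getLastD ' ')) := by
  match l with
  | [] => simp
  | [a] => simp
  | first :: b :: rest' =>
    obtain ⟨mid, lastC, hml⟩ : ∃ mid lastC, b :: rest' = mid ++ [lastC] := by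
      rcases List.eq_nil_or_concat (b :: rest') with h | ⟨m, c, h⟩
      · simp at h
      · exact ⟨m, c, by simpa [List.concat_eq_append] using h⟩
    rw [hml]
    have hlast : (first :: (mid ++ [lastC])).getLastD ' ' = lastC := by
      rw [← List.cons_append, List.getLastD_concat]
    cases mid with
    | nil => simp
    | cons x xs =>
      rw [hlast]
      simp only [List.cons_append, List.headD_cons, List.length_cons, List.length_append]
      have hdl : (x :: (xs ++ [lastC])).dropLast = x :: xs := by
        rw [← List.cons_append, List.dropLast_concat]
      have hgl : (x :: (xs ++ [lastC])).getLastD ' ' = lastC := by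
        rw [← List.cons_append, List.getLastD_concat]
      simp only [hdl, hgl]
      simp only [List.length_nil, List.length_cons]
      by_cases hlen : xs.length + 1 + 1 + 1 > 63
      · have h61 : ¬ (xs.length + 1 ≤ 61) := by omega
        simp [hlen, h61]
      · have hA : ¬ (xs.length + (0 + 1) + 1 + 1 < 3) := by omega
        have hB : ¬ (xs.length + (0 + 1) + 1 + 1 > 63) := by omega
        have h61 : xs.length + 1 ≤ 61 := by omega
        have himp1 : first ∈ pvEndChars → first ∈ pvAllowedChars := fun h =>
          by simpa using pvEnd_sub_allowed first (by simpa using h)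
        have himp2 : lastC ∈ pvEndChars → lastC ∈ pvAllowedChars := fun h =>
          by simpa using pvEnd_sub_allowed lastC (by simpa using h)
        by_cases he1 : pvEndChars.contains first = true <;>
          by_cases he2 : pvEndChars.contains lastC = true <;>
          by_cases hmidall : ((x :: xs).all pvAllowedChars.contains) = true <;>
          split_ifs <;>
          simp_all [List.any_cons, List.any_append, List.any_nil, List.all_cons] <;> omega
-- ===== VERDICT (by name: the statement is the Claim_ definition above) =====
theorem validate_bucket_name_spec : Claim_equal_validate_bucket_name := by
  intro s _
  unfold Spec_validate_bucket_name validate_bucket_name validate_bucket_name_alt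
  exact validate_bucket_name_list s.toList
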